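-- pv_equiv track=rewrite | github.com/c0nrad/sims | ising/scripts/ising_renormalization_line_old.py | get_renormalized_lines
-- ===== SOURCE A (Python) =====
-- def get_renormalized_lines(line):
--     out = [""]
--
--     for i in range(0, 6, 2):
--         if line[i] == line[i + 1]:
--             out = [a + line[i] for a in out]
--         else:
--             new_out = []
--             for a in out:
--                 new_out.append(a + "u")
--                 new_out.append(a + "d")
--
--             out = new_out
--
--     return out
-- ===== SOURCE B (Python) =====
-- def get_renormalized_lines(line):
--     options = [[line[i]] if line[i] == line[i + 1] else ["u", "d"]
--                for i in range(0, 6, 2)]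
--     return [x + y + z for x in options[0] for y in options[1] for z in options[2]]
-- ===== Notes on version B (the rewrite author's own statement) =====
-- stated objective: idiomatic
-- what changed: Replaces the incremental accumulator-doubling loop over pairs with a gather-then-cartesian-product decomposition: collect the per-pair options first, then take their product in one comprehension.
import Mathlib
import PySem

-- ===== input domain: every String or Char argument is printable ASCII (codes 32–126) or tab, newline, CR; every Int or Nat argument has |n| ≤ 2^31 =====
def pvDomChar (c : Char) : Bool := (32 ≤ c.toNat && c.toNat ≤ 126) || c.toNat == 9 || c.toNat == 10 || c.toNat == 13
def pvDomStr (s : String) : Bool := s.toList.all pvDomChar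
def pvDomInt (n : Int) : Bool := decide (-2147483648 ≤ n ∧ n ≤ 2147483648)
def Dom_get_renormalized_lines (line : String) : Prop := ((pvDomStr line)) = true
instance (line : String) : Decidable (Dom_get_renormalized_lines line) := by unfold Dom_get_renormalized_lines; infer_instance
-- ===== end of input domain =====

-- B replaces A's incremental accumulator-doubling loop by gathering the per-pair
-- options first and taking their cartesian product (idiomatic decomposition; same cost).

-- ===== PORT A =====
-- literal port of A: out = [""], then for i in range(0,6,2) either map-append
-- the shared character or double the accumulator with "u"/"d".
def get_renormalized_lines (line : String) : List String :=
  (PySem.List.pyRange 0 6 2).foldl (fun out i =>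
    if (PySem.Str.pyGet? line i).getD ' ' == (PySem.Str.pyGet? line (i+1)).getD ' ' then
      out.map (fun a => a.push ((PySem.Str.pyGet? line i).getD ' '))
    else
      out.foldl (fun newOut a => newOut ++ [a.push 'u', a.push 'd']) []) [""]

-- ===== PORT B =====
-- port of B: build the three per-pair option lists, then their cartesian product.
def get_renormalized_lines_alt (line : String) : List String :=
  let options := (PySem.List.pyRange 0 6 2).map (fun i =>
    if (PySem.Str.pyGet? line i).getD ' ' == (PySem.Str.pyGet? line (i+1)).getD ' ' then
      [String.ofList [(PySem.Str.pyGet? line i).getD ' ']]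
    else ["u", "d"])
  (options.getD 0 []).flatMap (fun x =>
    (options.getD 1 []).flatMap (fun y =>
      (options.getD 2 []).map (fun z => x ++ y ++ z)))

-- ===== PRECONDITION & SPEC =====
-- Pre_: A indexes line[0]..line[5], so it raises IndexError on strings shorter than 6.
def Pre_get_renormalized_lines (line : String) : Prop := 6 ≤ line.toList.length
instance (line : String) : Decidable (Pre_get_renormalized_lines line) := by unfold Pre_get_renormalized_lines; infer_instance
def pvWitness_get_renormalized_lines : String := "uuddud"

def Spec_get_renormalized_lines (line : String) (out : List String) : Prop := out = get_renormalized_lines_alt line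
instance (line : String) (out : List String) : Decidable (Spec_get_renormalized_lines line out) := by unfold Spec_get_renormalized_lines; infer_instance

-- ===== CLAIM (what is proved, stated in full; the proofs are below) =====
def Claim_equal_get_renormalized_lines : Prop := ∀ (line : String), Dom_get_renormalized_lines line → Pre_get_renormalized_lines line → Spec_get_renormalized_lines line (get_renormalized_lines line)

-- ===== LEMMAS AND PROOFS =====

theorem pv_str_eq_iff (s t : String) : s = t ↔ s.toList = t.toList :=
  ⟨fun h => by rw [h], fun h => String.toList_injective h⟩

theorem pv_get6 (line : String) (a b c d e f : Char) (t : List Char)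
    (hl : line.toList = a::b::c::d::e::f::t) :
    PySem.Str.pyGet? line 0 = some a ∧ PySem.Str.pyGet? line 1 = some b ∧
    PySem.Str.pyGet? line 2 = some c ∧ PySem.Str.pyGet? line 3 = some d ∧
    PySem.Str.pyGet? line 4 = some e ∧ PySem.Str.pyGet? line 5 = some f := by
  refine ⟨?_, ?_, ?_, ?_, ?_, ?_⟩
  · rw [show (0:Int) = ((0:Nat):Int) by norm_num, PySem.Str.pyGet?_natCast, hl]; rfl
  · rw [show (1:Int) = ((1:Nat):Int) by norm_num, PySem.Str.pyGet?_natCast, hl]; rfl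
  · rw [show (2:Int) = ((2:Nat):Int) by norm_num, PySem.Str.pyGet?_natCast, hl]; rfl
  · rw [show (3:Int) = ((3:Nat):Int) by norm_num, PySem.Str.pyGet?_natCast, hl]; rfl
  · rw [show (4:Int) = ((4:Nat):Int) by norm_num, PySem.Str.pyGet?_natCast, hl]; rfl
  · rw [show (5:Int) = ((5:Nat):Int) by norm_num, PySem.Str.pyGet?_natCast, hl]; rfl

theorem pv_core (line : String) (a b c d e f : Char) (t : List Char)
    (hl : line.toList = a::b::c::d::e::f::t) :
    get_renormalized_lines line = get_renormalized_lines_alt line := by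
  obtain ⟨g0, g1, g2, g3, g4, g5⟩ := pv_get6 line a b c d e f t hl
  have hr : PySem.List.pyRange 0 6 2 = [0, 2, 4] := by decide
  unfold get_renormalized_lines get_renormalized_lines_alt
  rw [hr]
  simp only [List.foldl, List.map, List.getD, List.flatMap, show (0:Int)+1 = 1 from rfl,
    show (2:Int)+1 = 3 from rfl, show (4:Int)+1 = 5 from rfl, g0, g1, g2, g3, g4, g5,
    Option.getD_some]
  split_ifs <;>
    simp_all [pv_str_eq_iff, List.foldl, beq_iff_eq, String.toList_push,
      String.toList_append, String.toList_ofList]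

-- ===== VERDICT (by name: the statement is the Claim_ definition above) =====
theorem get_renormalized_lines_spec : Claim_equal_get_renormalized_lines := by
  intro line _ hpre
  unfold Spec_get_renormalized_lines
  unfold Pre_get_renormalized_lines at hpre
  obtain ⟨a,b,c,d,e,f,t,hl⟩ : ∃ a b c d e f t, line.toList = a::b::c::d::e::f::t := by
    rcases h : line.toList with _|⟨a,_|⟨b,_|⟨c,_|⟨d,_|⟨e,_|⟨f,t⟩⟩⟩⟩⟩⟩ <;> simp_all
  exact pv_core line a b c d e f t hl
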